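-- pv_equiv track=rewrite | github.com/flying-bear/practice | morphological splitting evaluation/evaluation.py | check_morphs_and_tags
-- ===== SOURCE A (Python) =====
-- def check_morphs_and_tags(f_tag_dict, s_tag_dict): # compares morphemes and tags given two dicts
--     loc_eval = {'CorrectMorphemes':0, 'CorrectTags':0}
--     for key in s_tag_dict:
--         if key in f_tag_dict:
--             loc_eval['CorrectMorphemes'] += 1
--             if s_tag_dict[key] == f_tag_dict[key]:
--                 loc_eval['CorrectTags'] += 1
--     return loc_eval
-- ===== SOURCE B (Python) =====
-- def check_morphs_and_tags(f_tag_dict, s_tag_dict): # inclusion-exclusion: count = len(s)+len(f)-len(union of views)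
--     ns, nf = len(s_tag_dict), len(f_tag_dict)
--     return {'CorrectMorphemes': ns + nf - len(s_tag_dict.keys() | f_tag_dict.keys()),
--             'CorrectTags': ns + nf - len(s_tag_dict.items() | f_tag_dict.items())}
-- ===== Notes on version B (the rewrite author's own statement) =====
-- stated objective: alternative
-- what changed: B drops A's per-key membership-and-comparison loop entirely: by inclusion-exclusion each count is len(s)+len(f) minus the size of a union of dict views (keys-view union for CorrectMorphemes, items-view union for CorrectTags), so no key of one dict is ever looked up in the other.
import Mathlib
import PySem

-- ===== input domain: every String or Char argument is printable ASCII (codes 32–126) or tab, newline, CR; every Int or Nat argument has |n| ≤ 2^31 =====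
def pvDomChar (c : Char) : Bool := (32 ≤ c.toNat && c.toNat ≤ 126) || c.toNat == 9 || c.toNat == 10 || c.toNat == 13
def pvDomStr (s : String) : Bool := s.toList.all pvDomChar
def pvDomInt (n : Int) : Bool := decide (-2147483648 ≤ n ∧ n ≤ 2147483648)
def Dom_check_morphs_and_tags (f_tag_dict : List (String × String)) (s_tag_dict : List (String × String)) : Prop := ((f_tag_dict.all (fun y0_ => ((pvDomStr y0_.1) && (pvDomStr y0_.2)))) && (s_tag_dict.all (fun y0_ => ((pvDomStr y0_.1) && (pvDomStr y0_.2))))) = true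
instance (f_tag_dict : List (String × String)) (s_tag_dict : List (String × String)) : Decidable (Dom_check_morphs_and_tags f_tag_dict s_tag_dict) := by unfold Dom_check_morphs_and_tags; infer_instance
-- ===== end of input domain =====

-- B replaces A's membership-testing counter loop by inclusion–exclusion: each count is len(s)+len(f) minus the size of a union of dict views (keys for morphemes, items for tags); same cost, a plainer two-line formula.


-- ===== PORT A =====
-- Port of A: one loop over s's keys, updating a mutable counter dict; returns its items.
def check_morphs_and_tags (f_tag_dict : List (String × String)) (s_tag_dict : List (String × String)) : List (String × Int) :=
  let fd := PySem.Dict.ofList f_tag_dict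
  let sd := PySem.Dict.ofList s_tag_dict
  let loc_eval : PySem.Dict String Int := PySem.Dict.ofList [("CorrectMorphemes", 0), ("CorrectTags", 0)]
  (sd.keys.foldl (fun le key =>
    if fd.contains key then
      let le := le.modify "CorrectMorphemes" 0 (· + 1)
      if sd.get? key == fd.get? key then le.modify "CorrectTags" 0 (· + 1) else le
    else le) loc_eval).items

-- ===== PORT B =====
-- Port of B: each count is ns + nf minus the size of a union of dict views (keys resp. items).
def check_morphs_and_tags_alt (f_tag_dict : List (String × String)) (s_tag_dict : List (String × String)) : List (String × Int) :=
  let fd := PySem.Dict.ofList f_tag_dict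
  let sd := PySem.Dict.ofList s_tag_dict
  let ns : Int := sd.size
  let nf : Int := fd.size
  [("CorrectMorphemes", ns + nf - ((PySem.Set.union sd.keys fd.keys).length : Int)),
   ("CorrectTags", ns + nf - ((PySem.Set.union sd.items fd.items).length : Int))]

-- ===== PRECONDITION & SPEC =====
def Spec_check_morphs_and_tags (f_tag_dict : List (String × String)) (s_tag_dict : List (String × String)) (out : List (String × Int)) : Prop := out = check_morphs_and_tags_alt f_tag_dict s_tag_dict
instance (f_tag_dict : List (String × String)) (s_tag_dict : List (String × String)) (out : List (String × Int)) : Decidable (Spec_check_morphs_and_tags f_tag_dict s_tag_dict out) := by unfold Spec_check_morphs_and_tags; infer_instance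

-- ===== CLAIM (what is proved, stated in full; the proofs are below) =====
def Claim_equal_check_morphs_and_tags : Prop := ∀ (f_tag_dict : List (String × String)) (s_tag_dict : List (String × String)), Dom_check_morphs_and_tags f_tag_dict s_tag_dict → Spec_check_morphs_and_tags f_tag_dict s_tag_dict (check_morphs_and_tags f_tag_dict s_tag_dict)

-- ===== LEMMAS AND PROOFS =====

lemma cmt_stepM (a b : Int) :
    (PySem.Dict.mk [("CorrectMorphemes", a), ("CorrectTags", b)]).modify "CorrectMorphemes" 0 (· + 1)
      = PySem.Dict.mk [("CorrectMorphemes", a + 1), ("CorrectTags", b)] := rfl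

lemma cmt_stepT (a b : Int) :
    (PySem.Dict.mk [("CorrectMorphemes", a), ("CorrectTags", b)]).modify "CorrectTags" 0 (· + 1)
      = PySem.Dict.mk [("CorrectMorphemes", a), ("CorrectTags", b + 1)] := rfl

-- A's loop computes the two filter-counts over s's keys.
lemma cmt_loop (fd sd : PySem.Dict String String) (ks : List String) (a b : Int) :
    ks.foldl (fun le key =>
      if fd.contains key then
        let le := le.modify "CorrectMorphemes" 0 (· + 1)
        if sd.get? key == fd.get? key then le.modify "CorrectTags" 0 (· + 1) else le
      else le) (PySem.Dict.mk [("CorrectMorphemes", a), ("CorrectTags", b)])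
    = PySem.Dict.mk [("CorrectMorphemes", a + ((ks.filter (fun k => fd.contains k)).length : Int)),
        ("CorrectTags", b + ((ks.filter (fun k => fd.contains k && (sd.get? k == fd.get? k))).length : Int))] := by
  induction ks generalizing a b with
  | nil => simp
  | cons k ks ih =>
    simp only [List.foldl_cons, List.filter_cons]
    by_cases hc : fd.contains k = true
    · by_cases he : (sd.get? k == fd.get? k) = true
      · simp only [hc, he, if_true, Bool.true_and, cmt_stepM, cmt_stepT]
        rw [ih]
        simp only [PySem.Dict.mk.injEq, List.cons.injEq, Prod.mk.injEq, List.length_cons]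
        and_intros <;> first | rfl | trivial | omega
      · simp only [Bool.not_eq_true] at he
        simp only [hc, he, if_true, Bool.false_eq_true, if_false, Bool.true_and, cmt_stepM]
        rw [ih]
        simp only [PySem.Dict.mk.injEq, List.cons.injEq, Prod.mk.injEq, List.length_cons]
        and_intros <;> first | rfl | trivial | omega
    · simp only [Bool.not_eq_true] at hc
      simp only [hc, Bool.false_eq_true, if_false, Bool.false_and]
      exact ih a b

-- a nodup list's length is its toFinset's card, and a union-of-sets' finset is the finset union
lemma union_length_eq {α : Type} [DecidableEq α] [BEq α] [LawfulBEq α] (s t : List α) (hs : s.Nodup) :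
    (PySem.Set.union s t).length = (s.toFinset ∪ t.toFinset).card := by
  have hn : (PySem.Set.union s t).Nodup := PySem.Set.nodup_update s t hs
  rw [← List.toFinset_card_of_nodup hn]
  congr 1
  ext x
  simp [PySem.Set.union, PySem.Set.mem_update]

lemma filter_mem_length_eq {α : Type} [DecidableEq α] [BEq α] [LawfulBEq α] (s t : List α) (hs : s.Nodup) :
    (s.filter (fun x => t.contains x)).length = (s.toFinset ∩ t.toFinset).card := by
  rw [← List.toFinset_card_of_nodup (hs.filter _)]
  congr 1
  ext x
  simp

-- inclusion–exclusion, over Int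
lemma incl_excl {α : Type} [DecidableEq α] (s t : Finset α) :
    ((s ∩ t).card : Int) = (s.card : Int) + t.card - (s ∪ t).card := by
  have := Finset.card_inter_add_card_union s t
  omega

-- ===== VERDICT (by name: the statement is the Claim_ definition above) =====
theorem check_morphs_and_tags_spec : Claim_equal_check_morphs_and_tags := by
  intro f s _
  unfold Spec_check_morphs_and_tags check_morphs_and_tags check_morphs_and_tags_alt
  simp only []
  rw [show (PySem.Dict.ofList [("CorrectMorphemes", (0:Int)), ("CorrectTags", 0)]) = PySem.Dict.mk [("CorrectMorphemes", 0), ("CorrectTags", 0)] from rfl]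
  rw [cmt_loop]
  have hks : (PySem.Dict.ofList s).keys.Nodup := PySem.Dict.nodup_keys_ofList s
  have hkf : (PySem.Dict.ofList f).keys.Nodup := PySem.Dict.nodup_keys_ofList f
  have his : (PySem.Dict.ofList s).items.Nodup := List.Nodup.of_map Prod.fst hks
  set sd := PySem.Dict.ofList s with hsd
  set fd := PySem.Dict.ofList f with hfd
  have hM : ((sd.keys.filter (fun k => fd.contains k)).length : Int)
      = (sd.size : Int) + fd.size - ((PySem.Set.union sd.keys fd.keys).length : Int) := by
    have h1 : sd.keys.filter (fun k => fd.contains k) = sd.keys.filter (fun k => fd.keys.contains k) :=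
      List.filter_congr (fun x _ => by simp [PySem.Dict.contains_eq_decide_mem_keys])
    rw [h1, filter_mem_length_eq _ _ hks, union_length_eq _ _ hks, incl_excl,
        List.toFinset_card_of_nodup hks, List.toFinset_card_of_nodup hkf]
    simp [PySem.Dict.size, PySem.Dict.keys]
  have h2 : (sd.keys.filter (fun k => fd.contains k && (sd.get? k == fd.get? k))).length
      = (sd.items.filter (fun p => fd.items.contains p)).length := by
    rw [show sd.keys = sd.items.map Prod.fst from rfl, List.filter_map, List.length_map]
    congr 1
    apply List.filter_congr
    intro p hp
    obtain ⟨k, v⟩ := p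
    have hg : sd.get? k = some v := PySem.Dict.get?_of_mem_items sd hp hks
    simp only [Function.comp_apply, hg]
    cases hfg : fd.get? k with
    | none =>
      have hc : fd.contains k = false := by
        rw [PySem.Dict.contains_eq_isSome_get?, hfg]; rfl
      have hnm : (k, v) ∉ fd.items := fun hm => by
        have := PySem.Dict.get?_of_mem_items fd hm hkf
        rw [hfg] at this; cases this
      simp [hc, hnm]
    | some w =>
      have hc : fd.contains k = true := by
        rw [PySem.Dict.contains_eq_isSome_get?, hfg]; rfl
      have hiff : (k, v) ∈ fd.items ↔ v = w := by
        rw [← PySem.Dict.get?_eq_some_iff_mem_items fd k v hkf, hfg]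
        simp [eq_comm]
      by_cases hw : v = w
      · subst hw
        simp [hc, hiff.mpr rfl]
      · simp [hc, hw, hiff]
  have hT : ((sd.keys.filter (fun k => fd.contains k && (sd.get? k == fd.get? k))).length : Int)
      = (sd.size : Int) + fd.size - ((PySem.Set.union sd.items fd.items).length : Int) := by
    rw [h2, filter_mem_length_eq _ _ his, union_length_eq _ _ his, incl_excl,
        List.toFinset_card_of_nodup his,
        List.toFinset_card_of_nodup (List.Nodup.of_map Prod.fst hkf)]
    simp [PySem.Dict.size]
  simp only [Int.zero_add, hM, hT]
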